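-- pv_equiv track=rewrite | github.com/Vivekyadv/LeetCode | Arrays/8. min moves to equal elements.py | solve
-- ===== SOURCE A (Python) =====
-- def solve(arr):
--     arr.sort()
--     n = len(arr)
--     count = 0
--
--     while arr[-1]*n != sum(arr):
--         for i in range(n-1):
--             arr[i] += 1
--         count += 1
--         arr.sort()
--     return count
-- ===== SOURCE B (Python) =====
-- # Closed form: each move (increment n-1 elements) is equivalent to decrementing one
-- # element, so the answer is sum(arr) - len(arr)*min(arr).
-- # Note: unlike A, B does not mutate arr (equivalence is about the return value).
-- def solve(arr):
--     return sum(arr) - len(arr) * min(arr)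
-- ===== Notes on version B (the rewrite author's own statement) =====
-- stated objective: faster
-- what changed: Replaced the simulate-until-equal loop (repeated re-sorting and incrementing n-1 elements) with the closed form sum(arr) - n*min(arr).
import Mathlib
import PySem

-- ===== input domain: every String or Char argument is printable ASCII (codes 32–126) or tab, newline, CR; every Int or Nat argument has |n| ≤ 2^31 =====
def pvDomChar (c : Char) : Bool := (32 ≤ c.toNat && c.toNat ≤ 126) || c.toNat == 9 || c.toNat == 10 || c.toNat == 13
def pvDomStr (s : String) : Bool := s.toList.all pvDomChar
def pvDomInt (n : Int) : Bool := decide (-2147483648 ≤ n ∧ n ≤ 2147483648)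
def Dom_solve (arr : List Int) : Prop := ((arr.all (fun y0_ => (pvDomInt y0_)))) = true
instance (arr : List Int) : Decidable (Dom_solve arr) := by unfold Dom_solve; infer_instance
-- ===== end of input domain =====

-- B replaces A's simulate-until-equal loop by the closed form sum(arr) - n*min(arr);
-- A sorts/mutates its argument in place, B does not: the equivalence is about the return value.

-- ===== PORT A =====
-- 'for i in range(n-1): arr[i] += 1' : add 1 to every element except the last
def pvIncButLast : List Int → List Int
  | [] => []
  | [x] => [x]
  | x :: y :: t => (x + 1) :: pvIncButLast (y :: t)

-- arr.sort() (in-place sort; the resulting sorted list)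
def pvSortI (a : List Int) : List Int := PySem.List.sorted a (fun v => v) false

theorem pvIncButLast_length (a : List Int) : (pvIncButLast a).length = a.length := by
  match a with
  | [] => rfl
  | [x] => rfl
  | x :: y :: t => simp [pvIncButLast, pvIncButLast_length (y :: t)]

theorem pvSort_length (a : List Int) : (pvSortI a).length = a.length :=
  PySem.List.length_sorted (xs := a) (key := fun v => v) (rev := false)

theorem pvSort_pairwise (a : List Int) : (pvSortI a).Pairwise (· ≤ ·) :=
  PySem.List.sorted_pairwise (xs := a) (key := fun v => v)

theorem pvSort_perm (a : List Int) : (pvSortI a).Perm a :=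
  PySem.List.sorted_perm (xs := a) (key := fun v => v) (rev := false)

theorem pvIncButLast_eq (a : List Int) (h : a ≠ []) :
    pvIncButLast a = a.dropLast.map (· + 1) ++ [a.getLast h] := by
  match a with
  | [x] => rfl
  | x :: y :: t =>
      simp [pvIncButLast, pvIncButLast_eq (y :: t) (by simp), List.getLast]

theorem pv_head_min (a : List Int) (hs : a.Pairwise (· ≤ ·)) : ∀ y ∈ a, a.headI ≤ y := by
  match a with
  | [] => intro y hy; simp at hy
  | x :: t =>
      intro y hy
      rcases List.mem_cons.mp hy with h | h
      · simp [h]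
      · exact (List.pairwise_cons.mp hs).1 y h

theorem pv_last_max (a : List Int) (hne : a ≠ []) (hs : a.Pairwise (· ≤ ·)) :
    ∀ y ∈ a, y ≤ a.getLast hne := by
  match a with
  | [x] => intro y hy; simp at hy; simp [hy]
  | x :: y' :: t =>
      intro y hy
      have hrec := pv_last_max (y' :: t) (by simp) (List.pairwise_cons.mp hs).2
      rw [List.getLast_cons (by simp)]
      rcases List.mem_cons.mp hy with h | h
      · subst h
        exact le_trans ((List.pairwise_cons.mp hs).1 y' (by simp)) (hrec y' (by simp))
      · exact hrec y h

theorem pv_sum_ge (a : List Int) (c : Int) (h : ∀ y ∈ a, c ≤ y) :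
    (a.length : Int) * c ≤ a.sum := by
  induction a with
  | nil => simp
  | cons x t ih =>
      have h1 := h x (by simp)
      have h2 := ih (fun y hy => h y (by simp [hy]))
      simp only [List.sum_cons, List.length_cons]
      push_cast
      nlinarith

theorem pv_sum_le (a : List Int) (c : Int) (h : ∀ y ∈ a, y ≤ c) :
    a.sum ≤ (a.length : Int) * c := by
  induction a with
  | nil => simp
  | cons x t ih =>
      have h1 := h x (by simp)
      have h2 := ih (fun y hy => h y (by simp [hy]))
      simp only [List.sum_cons, List.length_cons]
      push_cast
      nlinarith

-- min of the new (incremented, re-sorted) list is old min + 1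
theorem pv_newhead (a : List Int) (hne : a ≠ []) (hs : a.Pairwise (· ≤ ·))
    (hlt : a.headI < a.getLast hne) :
    (pvSortI (pvIncButLast a)).headI = a.headI + 1 := by
  have hheadmem : a.headI ∈ a.dropLast := by
    match a with
    | [x] => simp [List.getLast] at hlt
    | x :: y :: t => simp
  have hincne : pvIncButLast a ≠ [] := by
    rw [pvIncButLast_eq a hne]; simp
  have hbound : ∀ z ∈ pvIncButLast a, a.headI + 1 ≤ z := by
    intro z hz
    rw [pvIncButLast_eq a hne] at hz
    rcases List.mem_append.mp hz with h | h
    · obtain ⟨w, hw, rfl⟩ := List.mem_map.mp h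
      have hwa : w ∈ a := List.dropLast_subset a hw
      have := pv_head_min a hs w hwa
      omega
    · simp at h; subst h; omega
  have hmem : a.headI + 1 ∈ pvIncButLast a := by
    rw [pvIncButLast_eq a hne]
    exact List.mem_append.mpr (Or.inl (List.mem_map.mpr ⟨a.headI, hheadmem, rfl⟩))
  have hsne : pvSortI (pvIncButLast a) ≠ [] := by
    intro h
    rw [pvSortI, PySem.List.sorted_eq_nil_iff] at h
    exact hincne h
  obtain ⟨m, s, hms⟩ := List.exists_cons_of_ne_nil hsne
  have hmle : ∀ z ∈ pvIncButLast a, m ≤ z := by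
    intro z hz
    exact PySem.List.key_head_sorted_le (xs := pvIncButLast a) (key := fun v => v) hms z hz
  have hmmem : m ∈ pvIncButLast a := by
    have : m ∈ pvSortI (pvIncButLast a) := by rw [hms]; simp
    exact (pvSort_perm _).mem_iff.mp this
  have h1 := hmle _ hmem
  have h2 := hbound m hmmem
  rw [hms]
  simp only [List.headI_cons]
  omega

theorem pv_sum_map_add_one (l : List Int) : (l.map (· + 1)).sum = l.sum + l.length := by
  induction l with
  | nil => simp
  | cons x t ih => simp [ih]; ring

-- one loop iteration decreases the measure 'sum - n*min' by exactly 1, and the measure is ≥ 1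
-- when the loop guard holds; stated before the port because its decreasing_by cites it
theorem pvStep_measure (a : List Int) (last : Int)
    (hs : a.Pairwise (· ≤ ·)) (hne : a ≠ [])
    (hlast : a.getLast hne = last)
    (hg : last * (a.length : Int) ≠ a.sum) :
    ((pvSortI (pvIncButLast a)).sum
        - ((pvSortI (pvIncButLast a)).length : Int) * (pvSortI (pvIncButLast a)).headI)
      = (a.sum - (a.length : Int) * a.headI) - 1
    ∧ 1 ≤ a.sum - (a.length : Int) * a.headI := by
  have hn1 : 1 ≤ (a.length : Int) := by
    have := List.length_pos_of_ne_nil hne; omega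
  have hsumle : a.sum ≤ (a.length : Int) * last := by
    refine pv_sum_le a last ?_
    intro y hy; rw [← hlast]; exact pv_last_max a hne hs y hy
  have hsumge : (a.length : Int) * a.headI ≤ a.sum := pv_sum_ge a a.headI (pv_head_min a hs)
  have hsumlt : a.sum < (a.length : Int) * last := by
    rcases lt_or_eq_of_le hsumle with h | h
    · exact h
    · exact absurd (by linarith [h] : last * (a.length : Int) = a.sum) hg
  have hh0lt : a.headI < last := by
    by_contra hcon
    have hcon : last ≤ a.headI := not_lt.mp hcon
    have : (a.length : Int) * last ≤ (a.length : Int) * a.headI :=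
      mul_le_mul_of_nonneg_left hcon (by omega)
    linarith
  have hdec : a.dropLast ++ [last] = a := by
    rw [← hlast]; exact List.dropLast_append_getLast hne
  have hsum_split : a.sum = a.dropLast.sum + last := by
    conv_lhs => rw [← hdec]
    simp
  have hdlen : ((a.dropLast.length : Int)) = (a.length : Int) - 1 := by
    have := List.length_dropLast (xs := a)
    omega
  have hdropsum : ((a.length : Int) - 1) * a.headI ≤ a.dropLast.sum := by
    have := pv_sum_ge a.dropLast a.headI
      (fun y hy => pv_head_min a hs y (List.dropLast_subset a hy))
    rw [hdlen] at this
    exact this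
  have hmeas1 : 1 ≤ a.sum - (a.length : Int) * a.headI := by nlinarith
  have hincsum : (pvIncButLast a).sum = a.sum + (a.length : Int) - 1 := by
    rw [pvIncButLast_eq a hne, List.sum_append, pv_sum_map_add_one]
    simp only [List.sum_cons, List.sum_nil, add_zero]
    rw [hdlen]
    linarith [hsum_split]
  have hssum : (pvSortI (pvIncButLast a)).sum = (pvIncButLast a).sum :=
    (pvSort_perm _).sum_eq
  have hslen : ((pvSortI (pvIncButLast a)).length : Int) = (a.length : Int) := by
    rw [pvSort_length, pvIncButLast_length]
  have hhead : (pvSortI (pvIncButLast a)).headI = a.headI + 1 :=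
    pv_newhead a hne hs (by rw [hlast]; exact hh0lt)
  constructor
  · rw [hssum, hslen, hhead, hincsum]; ring
  · exact hmeas1

theorem pvStep_measure_toNat (a : List Int) (last : Int)
    (hs : a.Pairwise (· ≤ ·)) (hne : a ≠ [])
    (hlast : a.getLast hne = last)
    (hg : last * (a.length : Int) ≠ a.sum) :
    ((pvSortI (pvIncButLast a)).sum
        - ((pvSortI (pvIncButLast a)).length : Int) * (pvSortI (pvIncButLast a)).headI).toNat
      < (a.sum - (a.length : Int) * a.headI).toNat := by
  obtain ⟨h1, h2⟩ := pvStep_measure a last hs hne hlast hg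
  omega

-- the while loop; 'hs'/'hn' record the invariants A maintains (arr stays sorted, len(arr) = n)
def pvLoopA (a : List Int) (n count : Int)
    (hs : a.Pairwise (· ≤ ·)) (hn : (a.length : Int) = n) : Int :=
  match hg : PySem.List.pyGet? a (-1) with
  | none => count        -- arr[-1] raises IndexError here (empty arr); excluded by Pre_solve
  | some last =>
    if hlt : last * n ≠ a.sum then
      pvLoopA (pvSortI (pvIncButLast a)) n (count + 1) (pvSort_pairwise _)
        (by rw [pvSort_length, pvIncButLast_length]; exact hn)
    else count
termination_by (a.sum - (a.length : Int) * a.headI).toNat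
decreasing_by
  have hne : a ≠ [] := by
    intro h; subst h; simp [PySem.List.pyGet?] at hg
  have hlast : a.getLast hne = last := by
    have h2 := hg
    rw [PySem.List.pyGet?_neg_one, List.getLast?_eq_some_getLast hne] at h2
    exact Option.some_inj.mp h2
  refine pvStep_measure_toNat a last hs hne hlast ?_
  rw [hn]; exact hlt

def solve (arr : List Int) : Int :=
  let a := pvSortI arr
  let n : Int := (arr.length : Int)
  pvLoopA a n 0 (pvSort_pairwise arr) (by rw [pvSort_length])

-- ===== PORT B =====
def solve_alt (arr : List Int) : Int :=
  match PySem.List.min? arr (fun v => v) with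
  | none => 0            -- min(arr) raises ValueError here (empty arr); excluded by Pre_solve
  | some m => arr.sum - (arr.length : Int) * m

-- ===== PRECONDITION & SPEC =====
-- Both programs raise on the empty list (A: IndexError on arr[-1], B: ValueError on min), so it is excluded.
def Pre_solve (arr : List Int) : Prop := arr ≠ []
instance (arr : List Int) : Decidable (Pre_solve arr) := by unfold Pre_solve; infer_instance
def pvWitness_solve : List Int := [1, 5, 2]

def Spec_solve (arr : List Int) (out : Int) : Prop := out = solve_alt arr
instance (arr : List Int) (out : Int) : Decidable (Spec_solve arr out) := by unfold Spec_solve; infer_instance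

-- ===== CLAIM (what is proved, stated in full; the proofs are below) =====
def Claim_equal_solve : Prop := ∀ (arr : List Int), Dom_solve arr → Pre_solve arr → Spec_solve arr (solve arr)

-- ===== LEMMAS AND PROOFS =====

-- when the loop guard fails on a sorted nonempty list, all elements are equal, so sum - n*min = 0
theorem pv_measure_zero (a : List Int) (last : Int)
    (hs : a.Pairwise (· ≤ ·)) (hne : a ≠ [])
    (hlast : a.getLast hne = last)
    (heq : last * (a.length : Int) = a.sum) :
    a.sum - (a.length : Int) * a.headI = 0 := by
  obtain ⟨x, t, rfl⟩ := List.exists_cons_of_ne_nil hne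
  have hlmax := pv_last_max (x :: t) hne hs
  have hhmin := pv_head_min (x :: t) hs
  rw [hlast] at hlmax
  have htsum_le : t.sum ≤ (t.length : Int) * last :=
    pv_sum_le t last (fun y hy => hlmax y (by simp [hy]))
  have htsum_ge : (t.length : Int) * x ≤ t.sum :=
    pv_sum_ge t x (fun y hy => hhmin y (by simp [hy]))
  have hxlast : x ≤ last := hlmax x (by simp)
  have hsum : (x :: t).sum = x + t.sum := by simp
  have hlen : ((x :: t).length : Int) = (t.length : Int) + 1 := by simp
  rw [hsum, hlen] at heq ⊢
  simp only [List.headI_cons]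
  nlinarith

-- the loop computes count + (sum - n*min)
theorem pvLoop_val (N : Nat) (a : List Int) (n count : Int)
    (hs : a.Pairwise (· ≤ ·)) (hn : (a.length : Int) = n) (hne : a ≠ [])
    (hN : (a.sum - (a.length : Int) * a.headI).toNat = N) :
    pvLoopA a n count hs hn = count + (a.sum - (a.length : Int) * a.headI) := by
  induction N using Nat.strong_induction_on generalizing a count with
  | _ N ih =>
    rw [pvLoopA]
    split
    · next hg =>
        exfalso
        rw [PySem.List.pyGet?_neg_one, List.getLast?_eq_none_iff] at hg
        exact hne hg
    · next last hg =>
        have hlast : a.getLast hne = last := by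
          have h2 := hg
          rw [PySem.List.pyGet?_neg_one, List.getLast?_eq_some_getLast hne] at h2
          exact Option.some_inj.mp h2
        split
        · next hlt =>
            have hlt' : last * (a.length : Int) ≠ a.sum := by rw [hn]; exact hlt
            obtain ⟨hstep, hpos⟩ := pvStep_measure a last hs hne hlast hlt'
            have hdec := pvStep_measure_toNat a last hs hne hlast hlt'
            have hane : pvSortI (pvIncButLast a) ≠ [] := by
              intro h
              have := congrArg List.length h
              rw [pvSort_length, pvIncButLast_length] at this
              simp at this
              exact hne this
            rw [ih _ (by omega) (pvSortI (pvIncButLast a)) (count + 1) _ _ hane rfl]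
            rw [hstep]
            ring
        · next hlt =>
            have heq : last * (a.length : Int) = a.sum := by
              rw [hn]; by_contra h; exact hlt h
            rw [pv_measure_zero a last hs hne hlast heq]
            ring

-- ===== VERDICT (by name: the statement is the Claim_ definition above) =====
theorem solve_spec : Claim_equal_solve := by
  intro arr _ hpre
  unfold Spec_solve solve
  have hne : pvSortI arr ≠ [] := by
    intro h
    rw [pvSortI, PySem.List.sorted_eq_nil_iff] at h
    exact hpre h
  rw [pvLoop_val ((pvSortI arr).sum - ((pvSortI arr).length : Int) * (pvSortI arr).headI).toNat
      (pvSortI arr) (arr.length : Int) 0 (pvSort_pairwise arr) (by rw [pvSort_length]) hne rfl]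
  have hsum : (pvSortI arr).sum = arr.sum := (pvSort_perm arr).sum_eq
  have hlen : ((pvSortI arr).length : Int) = (arr.length : Int) := by rw [pvSort_length]
  -- the head of the sorted list is min(arr)
  obtain ⟨m', s, hms⟩ := List.exists_cons_of_ne_nil hne
  cases hmin : PySem.List.min? arr (fun v => v) with
  | none =>
      exfalso
      exact hpre ((PySem.List.min?_eq_none_iff arr (fun v => v)).mp hmin)
  | some m =>
      have hmmem : m ∈ arr := PySem.List.min?_mem hmin
      have hmismin : ∀ y ∈ arr, m ≤ y := by
        intro y hy
        exact PySem.List.min?_isMin hmin y hy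
      have hm'le : ∀ y ∈ arr, m' ≤ y := by
        intro y hy
        exact PySem.List.key_head_sorted_le (xs := arr) (key := fun v => v) hms y hy
      have hm'mem : m' ∈ arr := by
        have : m' ∈ pvSortI arr := by rw [hms]; simp
        exact (pvSort_perm arr).mem_iff.mp this
      have hmm' : m' = m := le_antisymm (hm'le m hmmem) (hmismin m' hm'mem)
      unfold solve_alt
      rw [hmin]
      rw [hsum, hlen, hms]
      simp only [List.headI_cons, hmm']
      ring
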